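-- pv_equiv track=rewrite | github.com/mainmanchandler/Cryptography-Classical-Ciphers | Simple DES/mod.py | get_sub_table
-- ===== SOURCE A (Python) =====
-- def get_sub_table(m):
--     """
--     ----------------------------------------------------
--     Static Method
--     Parameters:   m (int): an arbitrary mod
--     Return:       sub_table (2d list)
--     Description:  Construct and return subtraction table mod m
--                     element [r][c] represent r-c mod m
--                   Example: MOD.get_sub_table(3) --> [[[0,2,1],[1,0,2],[2,1,0]]
--     Errors:       if m is not an integer >= 2:
--                     return 'Error(MOD.get_sub_table): invalid input'
--     ---------------------------------------------------
--     """
--     sub_table = []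
--
--     #error check
--     if type(m) != int or m <= 1:
--         return 'Error(Mod.get_sub_table): invalid input'
--
--     #for every position in the list, create a mod sub table
--     for pos1 in range(m):
--
--         inner_list = []
--         for pos2 in range(m, 0, -1):
--             #this causes each inner list to shift to the left
--             sub_modded = (pos1 + pos2) % m
--             inner_list.append(sub_modded)
--
--         sub_table.append(inner_list)
--
--
--
--     return sub_table
-- ===== SOURCE B (Python) =====
-- def get_sub_table(m):
--     if type(m) != int or m <= 1:
--         return 'Error(Mod.get_sub_table): invalid input'
--     # the table is circulant: row r is a window of one precomputed descending cycle
--     cycle = [(m - 1 - j) % m for j in range(2 * m - 1)]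
--     return [cycle[m - 1 - r : 2 * m - 1 - r] for r in range(m)]
-- ===== Notes on version B (the rewrite author's own statement) =====
-- stated objective: alternative
-- what changed: B exploits that the table is circulant: it precomputes one descending cycle of length 2m-1 and takes each row as a slice of it, instead of A's nested loops computing a modulo per cell.
import Mathlib
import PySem

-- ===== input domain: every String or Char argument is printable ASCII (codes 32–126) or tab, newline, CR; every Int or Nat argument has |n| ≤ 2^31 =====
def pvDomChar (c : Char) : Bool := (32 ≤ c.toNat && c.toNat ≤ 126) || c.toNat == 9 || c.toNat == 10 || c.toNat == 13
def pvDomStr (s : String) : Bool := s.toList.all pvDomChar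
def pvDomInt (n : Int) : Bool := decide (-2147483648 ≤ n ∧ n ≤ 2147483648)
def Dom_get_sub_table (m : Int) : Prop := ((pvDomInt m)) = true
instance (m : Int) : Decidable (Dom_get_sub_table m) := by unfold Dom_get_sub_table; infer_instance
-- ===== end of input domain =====

-- B builds one descending cycle and slices each row from it (alternative decomposition; return-value equivalence for m ≥ 2).


-- ===== PORT A =====
-- for m ≤ 1 Python returns an error STRING (not a 2-d int list); that branch is outside Pre_ and returns [] here
def get_sub_table (m : Int) : List (List Int) :=
  if m ≤ 1 then []
  else
    (PySem.List.pyRange 0 m 1).foldl (fun sub_table pos1 =>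
      sub_table ++ [(PySem.List.pyRange m 0 (-1)).foldl
        (fun inner_list pos2 => inner_list ++ [PySem.Int.mod (pos1 + pos2) m]) []]) []

-- ===== PORT B =====
def get_sub_table_alt (m : Int) : List (List Int) :=
  if m ≤ 1 then []
  else
    let cycle := (PySem.List.pyRange 0 (2 * m - 1) 1).map (fun j => PySem.Int.mod (m - 1 - j) m)
    (PySem.List.pyRange 0 m 1).map (fun r =>
      PySem.List.slice cycle (some (m - 1 - r)) (some (2 * m - 1 - r)))

-- ===== PRECONDITION & SPEC =====
-- Pre_ excludes m ≤ 1 (including bools/non-ints in Python), where A returns an error string instead of a table.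
def Pre_get_sub_table (m : Int) : Prop := 2 ≤ m
instance (m : Int) : Decidable (Pre_get_sub_table m) := by unfold Pre_get_sub_table; infer_instance
def pvWitness_get_sub_table : Int := (3)

def Spec_get_sub_table (m : Int) (out : List (List Int)) : Prop := out = get_sub_table_alt m
instance (m : Int) (out : List (List Int)) : Decidable (Spec_get_sub_table m out) := by unfold Spec_get_sub_table; infer_instance

-- ===== CLAIM (what is proved, stated in full; the proofs are below) =====
def Claim_equal_get_sub_table : Prop := ∀ (m : Int), Dom_get_sub_table m → Pre_get_sub_table m → Spec_get_sub_table m (get_sub_table m)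

-- ===== LEMMAS AND PROOFS =====

-- each row of A equals B's slice of the cycle
lemma row_eq (m r : Int) (hm : 2 ≤ m) (hr0 : 0 ≤ r) (hr : r < m) :
    (PySem.List.pyRange m 0 (-1)).map (fun pos2 => PySem.Int.mod (r + pos2) m)
    = PySem.List.slice ((PySem.List.pyRange 0 (2 * m - 1) 1).map
        (fun j => PySem.Int.mod (m - 1 - j) m)) (some (m - 1 - r)) (some (2 * m - 1 - r)) := by
  rw [PySem.List.pyRange_neg_one, PySem.List.pyRange_one,
    PySem.List.slice_toNat _ (by omega) (by omega)]
  apply List.ext_getElem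
  · simp; omega
  · intro i h1 h2
    simp only [List.getElem_map, List.getElem_take, List.getElem_drop, List.getElem_range]
    rw [PySem.Int.mod_eq_emod_of_pos (show (0:Int) < m by omega),
      PySem.Int.mod_eq_emod_of_pos (show (0:Int) < m by omega)]
    have hcast : (↑((m - 1 - r).toNat + i) : Int) = m - 1 - r + i := by push_cast; omega
    have key : m - 1 - (0 + (↑((m - 1 - r).toNat + i) : Int)) = r - i := by rw [hcast]; ring
    rw [key]
    have hsum : r + (m - ↑i) = (r - i) + m * 1 := by ring
    rw [hsum, Int.add_mul_emod_self_left]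

theorem get_sub_table_spec : Claim_equal_get_sub_table := by
  intro m _ hm
  have hm2 : 2 ≤ m := hm
  unfold Spec_get_sub_table get_sub_table get_sub_table_alt
  have h1 : ¬ m ≤ 1 := by omega
  simp only [if_neg h1, PySem.List.foldl_append_singleton_eq_map]
  refine List.map_congr_left ?_
  intro r hr
  rw [PySem.List.mem_pyRange_one] at hr
  exact row_eq m r hm2 hr.1 hr.2
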